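-- pv_equiv track=rewrite | github.com/NUSTM/DALM | absa/data_utils.py | is_clean_tok
-- ===== SOURCE A (Python) =====
-- def is_clean_tok(tok_list):
--     found = False
--     for tok in tok_list:
--         if tok != "<unk>":
--             found = True
--         if tok[:2] in {"B-", "I-"}:
--             return False
--     if not found:
--         return False
--     return True
-- ===== SOURCE B (Python) =====
-- def is_clean_tok(tok_list):
--     tags = sum(1 for tok in tok_list if tok[:2] in {"B-", "I-"})
--     unks = tok_list.count("<unk>")
--     return tags == 0 and unks < len(tok_list)
-- ===== Notes on version B (the rewrite author's own statement) =====
-- stated objective: alternative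
-- what changed: Replaces A's stateful early-return loop with a boolean flag by full aggregation: count the B-/I- tag tokens and the <unk> tokens, then decide clean by the arithmetic test tags == 0 and unks < len(tok_list).
import Mathlib
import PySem

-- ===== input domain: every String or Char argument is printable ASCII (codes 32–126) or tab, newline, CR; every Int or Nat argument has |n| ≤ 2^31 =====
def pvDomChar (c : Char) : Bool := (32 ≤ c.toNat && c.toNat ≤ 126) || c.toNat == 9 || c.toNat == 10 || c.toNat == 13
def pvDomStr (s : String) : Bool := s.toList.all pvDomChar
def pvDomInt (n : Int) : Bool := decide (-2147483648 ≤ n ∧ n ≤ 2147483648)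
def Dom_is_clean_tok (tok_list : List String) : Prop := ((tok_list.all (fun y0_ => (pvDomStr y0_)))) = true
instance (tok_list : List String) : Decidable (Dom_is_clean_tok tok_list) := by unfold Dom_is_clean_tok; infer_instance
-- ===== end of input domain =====

-- B replaces A's stateful early-return loop (mutable found flag) by counting tag and <unk> tokens
-- and an arithmetic test (alternative decomposition, same cost).

-- ===== PORT A =====
-- A's loop carries the mutable 'found' flag and returns false at the first tag token;
-- after the loop it returns false iff found is still false.
def is_clean_tok_go : List String → Bool → Bool
  | [], found => if !found then false else true
  | tok :: rest, found =>
    let found' := if tok ≠ "<unk>" then true else found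
    if PySem.Str.slice tok none (some 2) = "B-" ∨ PySem.Str.slice tok none (some 2) = "I-" then
      false
    else
      is_clean_tok_go rest found'

def is_clean_tok (tok_list : List String) : Bool := is_clean_tok_go tok_list false

-- ===== PORT B =====
-- B aggregates: tags = sum(1 for tok if tok[:2] in {"B-","I-"}), unks = tok_list.count("<unk>"),
-- then the arithmetic test tags == 0 and unks < len(tok_list).
def is_clean_tok_alt (tok_list : List String) : Bool :=
  let tags : Int := tok_list.foldl (fun acc tok =>
    if PySem.Str.slice tok none (some 2) = "B-" ∨ PySem.Str.slice tok none (some 2) = "I-" then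
      acc + 1 else acc) 0
  let unks : Int := PySem.List.count tok_list "<unk>"
  decide (tags = 0 ∧ unks < (tok_list.length : Int))

-- ===== PRECONDITION & SPEC =====
def Spec_is_clean_tok (tok_list : List String) (out : Bool) : Prop := out = is_clean_tok_alt tok_list
instance (tok_list : List String) (out : Bool) : Decidable (Spec_is_clean_tok tok_list out) := by unfold Spec_is_clean_tok; infer_instance

-- ===== CLAIM (what is proved, stated in full; the proofs are below) =====
def Claim_equal_is_clean_tok : Prop := ∀ (tok_list : List String), Dom_is_clean_tok tok_list → Spec_is_clean_tok tok_list (is_clean_tok tok_list)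

-- ===== LEMMAS AND PROOFS =====

lemma is_clean_tok_go_eq (xs : List String) (found : Bool) :
    is_clean_tok_go xs found =
      if xs.any (fun tok =>
          PySem.Str.slice tok none (some 2) = "B-" ∨ PySem.Str.slice tok none (some 2) = "I-") then
        false
      else
        (found || xs.any (fun tok => tok ≠ "<unk>")) := by
  induction xs generalizing found with
  | nil => simp [is_clean_tok_go]
  | cons tok rest ih =>
    by_cases htag : PySem.Str.slice tok none (some 2) = "B-" ∨ PySem.Str.slice tok none (some 2) = "I-"
    · simp [is_clean_tok_go, htag]
    · have htag' : decide (PySem.Str.slice tok none (some 2) = "B-" ∨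
          PySem.Str.slice tok none (some 2) = "I-") = false := by simp [htag]
      simp only [is_clean_tok_go, if_neg htag, ih, List.any_cons, htag', Bool.false_or]
      cases hrest : rest.any (fun tok =>
          decide (PySem.Str.slice tok none (some 2) = "B-" ∨ PySem.Str.slice tok none (some 2) = "I-"))
      · by_cases hu : tok = "<unk>"
        · simp [hu]
        · cases found <;> simp [hu]
      · simp

-- ===== VERDICT (by name: the statement is the Claim_ definition above) =====
theorem is_clean_tok_spec : Claim_equal_is_clean_tok := by
  intro tok_list _
  unfold Spec_is_clean_tok is_clean_tok is_clean_tok_alt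
  rw [is_clean_tok_go_eq, PySem.List.foldl_ite_add_one, PySem.List.count_eq]
  simp only [zero_add, Bool.false_or]
  have h1 : ((tok_list.countP (fun tok =>
      decide (PySem.Str.slice tok none (some 2) = "B-" ∨ PySem.Str.slice tok none (some 2) = "I-")) : Int) = 0) ↔
      tok_list.any (fun tok =>
        decide (PySem.Str.slice tok none (some 2) = "B-" ∨ PySem.Str.slice tok none (some 2) = "I-")) = false := by
    rw [Int.natCast_eq_zero, List.countP_eq_zero, List.any_eq_false]
  have h2 : ((tok_list.count "<unk>" : Int) < (tok_list.length : Int)) ↔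
      tok_list.any (fun tok => tok ≠ "<unk>") = true := by
    constructor
    · intro h
      by_contra hall
      simp only [List.any_eq_true, not_exists, not_and, ne_eq, decide_not, Bool.not_eq_true',
        decide_eq_false_iff_not, not_not] at hall
      have : tok_list.count "<unk>" = tok_list.length := by
        rw [List.count_eq_length]; intro a ha; exact (hall a ha).symm
      omega
    · intro h
      rcases List.any_eq_true.mp h with ⟨a, ha, hne⟩
      have hne' : a ≠ "<unk>" := by simpa using hne
      have hle : tok_list.count "<unk>" ≤ tok_list.length := List.count_le_length
      have hneq : tok_list.count "<unk>" ≠ tok_list.length := by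
        intro heq
        exact hne' ((List.count_eq_length.mp heq a ha).symm)
      omega
  cases hb : tok_list.any (fun tok =>
      decide (PySem.Str.slice tok none (some 2) = "B-" ∨ PySem.Str.slice tok none (some 2) = "I-")) with
  | true =>
    rw [if_pos rfl]
    exact (decide_eq_false (fun hpq => Bool.noConfusion ((h1.mp hpq.1).symm.trans hb))).symm
  | false =>
    rw [if_neg (by decide)]
    cases hc : tok_list.any (fun tok => tok ≠ "<unk>") with
    | false =>
      exact (decide_eq_false (fun hpq => Bool.noConfusion ((h2.mp hpq.2).symm.trans hc))).symm
    | true =>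
      exact (decide_eq_true ⟨h1.mpr hb, h2.mpr hc⟩).symm
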